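-- pv_equiv track=rewrite | github.com/sofialaballeja21/LenguajeYParadigma | caracteresEspeciales.py | es_valida
-- ===== SOURCE A (Python) =====
-- def es_valida(lexema):
--     Q0 = 0  # Estado inicial
--     Q = [0, 1]  # Conjunto de estados
--     F = [1]  # Estado de aceptación
--
--     estado_actual = Q0
--     indice = 0
--
--     # Definir alfabeto SIGMA
--     SIGMA = {
--         "K": 0,
--         "L": 1,
--         "N": 2,
--         "O": 3,
--         "OTRO": 4
--     }
--
--     # Tabla de transiciones DELTA
--     DELTA = [
--         [1, 1, 1, 3, 3],  # Transiciones de Q0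
--         [1, 1, 1, 1, 3],  # Transiciones de Q1
--         [3, 3, 3, 3, 3],  # Transiciones del estado muerto Q3
--     ]
--
--     # Función para mapear caracteres a símbolos del alfabeto
--     def simbolo(caracter):
--         if caracter in SIGMA:
--             return SIGMA[caracter]
--         return SIGMA["OTRO"]
--
--     # Procesar cada carácter del lexema
--     while indice < len(lexema) and estado_actual != 3:  # Estado muerto es Q3
--         estado_actual = DELTA[estado_actual][simbolo(lexema[indice])]
--         indice += 1
--
--     # Verificar si el estado final es de aceptación
--     return estado_actual in F
-- ===== SOURCE B (Python) =====
-- def es_valida(lexema):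
--     if not lexema:
--         return False
--     if lexema[0] not in ('K', 'L', 'N'):
--         return False
--     return all(c in ('K', 'L', 'N', 'O') for c in lexema[1:])
-- ===== Notes on version B (the rewrite author's own statement) =====
-- stated objective: simpler
-- what changed: Replaced the table-driven DFA simulation (state variable, symbol map, transition matrix, dead state) with a direct predicate on the accepted language: nonempty, first char in {K,L,N}, remaining chars in {K,L,N,O}.
import Mathlib
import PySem

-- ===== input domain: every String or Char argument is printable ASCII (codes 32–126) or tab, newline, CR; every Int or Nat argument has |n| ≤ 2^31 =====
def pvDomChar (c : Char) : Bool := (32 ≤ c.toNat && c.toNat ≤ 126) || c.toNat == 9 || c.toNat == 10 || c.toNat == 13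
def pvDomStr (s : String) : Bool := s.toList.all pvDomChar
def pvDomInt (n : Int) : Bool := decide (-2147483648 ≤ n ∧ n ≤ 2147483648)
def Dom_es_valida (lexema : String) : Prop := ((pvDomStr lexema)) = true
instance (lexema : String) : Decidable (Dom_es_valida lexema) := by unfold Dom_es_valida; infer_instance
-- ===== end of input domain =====

-- B replaces A's table-driven DFA simulation by a direct membership predicate on the accepted language (simpler; same cost).


-- ===== PORT A =====
-- A simulates the DFA: state loop over characters, exiting at dead state 3.
def pvSimbolo (c : Char) : Int :=
  if c = 'K' then 0 else if c = 'L' then 1 else if c = 'N' then 2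
  else if c = 'O' then 3 else 4

def pvDELTA : List (List Int) :=
  [[1, 1, 1, 3, 3], [1, 1, 1, 1, 3], [3, 3, 3, 3, 3]]

-- the while loop: while indice < len and estado != 3
def pvLoopA (estado : Int) (cs : List Char) : Int :=
  match cs with
  | [] => estado
  | c :: rest =>
      if estado ≠ 3 then
        pvLoopA ((PySem.List.pyGet? ((PySem.List.pyGet? pvDELTA estado).getD []) (pvSimbolo c)).getD 3) rest
      else estado

def es_valida (lexema : String) : Bool :=
  ([1] : List Int).contains (pvLoopA 0 lexema.toList)

-- ===== PORT B =====
def es_valida_alt (lexema : String) : Bool :=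
  match lexema.toList with
  | [] => false
  | c :: rest =>
      (['K', 'L', 'N'] : List Char).contains c &&
      rest.all (fun d => (['K', 'L', 'N', 'O'] : List Char).contains d)

-- ===== PRECONDITION & SPEC =====
def Spec_es_valida (lexema : String) (out : Bool) : Prop := out = es_valida_alt lexema
instance (lexema : String) (out : Bool) : Decidable (Spec_es_valida lexema out) := by unfold Spec_es_valida; infer_instance

-- ===== CLAIM (what is proved, stated in full; the proofs are below) =====
def Claim_equal_es_valida : Prop := ∀ (lexema : String), Dom_es_valida lexema → Spec_es_valida lexema (es_valida lexema)

-- ===== LEMMAS AND PROOFS =====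
-- From the dead state the loop stays dead.
theorem pvLoopA_dead (cs : List Char) : pvLoopA 3 cs = 3 := by
  cases cs with
  | nil => rfl
  | cons c rest => simp [pvLoopA]

-- From the accepting state: stays 1 iff every remaining char is in {K,L,N,O}.
theorem pvLoopA_one (cs : List Char) :
    pvLoopA 1 cs = if cs.all (fun d => (['K','L','N','O'] : List Char).contains d) then 1 else 3 := by
  induction cs with
  | nil => rfl
  | cons c rest ih =>
      by_cases hK : c = 'K'
      · simp [pvLoopA, hK, pvSimbolo, PySem.List.pyGet?, PySem.List.pyIdx?, pvDELTA, ih]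
      · by_cases hL : c = 'L'
        · simp [pvLoopA, hK, hL, pvSimbolo, PySem.List.pyGet?, PySem.List.pyIdx?, pvDELTA, ih]
        · by_cases hN : c = 'N'
          · simp [pvLoopA, hK, hL, hN, pvSimbolo, PySem.List.pyGet?, PySem.List.pyIdx?, pvDELTA, ih]
          · by_cases hO : c = 'O'
            · simp [pvLoopA, hK, hL, hN, hO, pvSimbolo, PySem.List.pyGet?, PySem.List.pyIdx?, pvDELTA, ih]
            · simp [pvLoopA, hK, hL, hN, hO, pvSimbolo, PySem.List.pyGet?, PySem.List.pyIdx?, pvDELTA, pvLoopA_dead]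

theorem pv_all_eq (rest : List Char) :
    decide (∀ x ∈ rest, ¬x = 'K' → ¬x = 'L' → ¬x = 'N' → x = 'O') =
      rest.all fun d => decide (d = 'K') || (decide (d = 'L') || (decide (d = 'N') || decide (d = 'O'))) := by
  rw [Bool.eq_iff_iff]
  simp only [decide_eq_true_eq, List.all_eq_true, Bool.or_eq_true, decide_eq_true_eq]
  constructor <;> intro h x hx <;> have := h x hx <;> tauto

-- ===== VERDICT (by name: the statement is the Claim_ definition above) =====
theorem es_valida_spec : Claim_equal_es_valida := by
  intro lexema _
  unfold Spec_es_valida es_valida es_valida_alt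
  cases h : lexema.toList with
  | nil => simp [h, pvLoopA]
  | cons c rest =>
      by_cases hK : c = 'K'
      · simp [pvLoopA, hK, pvSimbolo, PySem.List.pyGet?, PySem.List.pyIdx?, pvDELTA, pvLoopA_one, pv_all_eq]
      · by_cases hL : c = 'L'
        · simp [pvLoopA, hK, hL, pvSimbolo, PySem.List.pyGet?, PySem.List.pyIdx?, pvDELTA, pvLoopA_one, pv_all_eq]
        · by_cases hN : c = 'N'
          · simp [pvLoopA, hK, hL, hN, pvSimbolo, PySem.List.pyGet?, PySem.List.pyIdx?, pvDELTA, pvLoopA_one, pv_all_eq]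
          · by_cases hO : c = 'O'
            · simp [pvLoopA, hK, hL, hN, hO, pvSimbolo, PySem.List.pyGet?, PySem.List.pyIdx?, pvDELTA, pvLoopA_dead]
            · simp [pvLoopA, hK, hL, hN, hO, pvSimbolo, PySem.List.pyGet?, PySem.List.pyIdx?, pvDELTA, pvLoopA_dead]
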